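-- pv_equiv track=rewrite | github.com/BANADDA/polarisLLM-repo | polarisLLM.py | add_family_info
-- ===== SOURCE A (Python) =====
-- def add_family_info(models, config):
--     """Add family information to models based on config file"""
--     model_to_family = {}
--
--     # Create mapping from model_id to family
--     for category in ['multimodal_models', 'text_only_models']:
--         if category in config:
--             for family, family_models in config[category].items():
--                 for model in family_models:
--                     model_id = model.get('model_id')
--                     if model_id:
--                         model_to_family[model_id] = family
--
--     # Add family info to each model
--     for model in models:
--         model_id = model.get('model_id')
--         if model_id in model_to_family:
--             model['family'] = model_to_family[model_id]
--
--     return models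
-- ===== SOURCE B (Python) =====
-- def add_family_info(models, config):
--     """Add family information to models based on config file"""
--     # Group the models by their model_id once, then push family names from the
--     # config onto the matching groups; later config entries overwrite earlier.
--     models_by_id = {}
--     for model in models:
--         model_id = model.get('model_id')
--         if model_id:
--             models_by_id.setdefault(model_id, []).append(model)
--
--     for category in ('multimodal_models', 'text_only_models'):
--         for family, family_models in config.get(category, {}).items():
--             for entry in family_models:
--                 entry_id = entry.get('model_id')
--                 if entry_id:
--                     for model in models_by_id.get(entry_id, ()):
--                         model['family'] = family
--     return models
-- ===== Notes on version B (the rewrite author's own statement) =====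
-- stated objective: alternative
-- what changed: Inverts the data flow: instead of precomputing a model_id->family mapping and looking each model up, B groups the models by model_id once and then pushes family names from the config onto the matching groups, later config entries naturally overwriting earlier ones.
import Mathlib
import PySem

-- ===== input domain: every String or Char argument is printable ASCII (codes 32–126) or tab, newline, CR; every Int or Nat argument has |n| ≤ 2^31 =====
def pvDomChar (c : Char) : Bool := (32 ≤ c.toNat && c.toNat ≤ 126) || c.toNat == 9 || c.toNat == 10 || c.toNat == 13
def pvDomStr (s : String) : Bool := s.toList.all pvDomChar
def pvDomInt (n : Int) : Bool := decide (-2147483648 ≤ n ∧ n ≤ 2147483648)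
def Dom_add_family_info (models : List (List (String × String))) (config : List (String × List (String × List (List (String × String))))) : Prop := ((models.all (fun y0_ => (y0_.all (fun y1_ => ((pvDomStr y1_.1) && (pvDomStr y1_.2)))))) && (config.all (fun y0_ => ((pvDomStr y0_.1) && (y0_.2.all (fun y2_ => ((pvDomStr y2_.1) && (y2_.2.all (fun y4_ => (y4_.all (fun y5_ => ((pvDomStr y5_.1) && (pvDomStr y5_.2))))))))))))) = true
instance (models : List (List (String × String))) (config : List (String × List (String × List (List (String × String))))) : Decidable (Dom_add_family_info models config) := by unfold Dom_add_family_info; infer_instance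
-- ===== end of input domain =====

-- B inverts the data flow: it groups the models by model_id once and pushes family
-- names from the config onto the matching groups (alternative decomposition, same
-- cost). Both Pythons mutate the model dicts in place the same way; the theorems
-- are about the returned value.

-- model['family'] = fam  (shared one-liner: the dict assignment both Pythons perform)
def insFam (fam : String) (model : List (String × String)) : List (String × String) :=
  ((PySem.Dict.mk model).insert "family" fam).items

-- ===== PORT A =====
-- A's first loop nest: model_to_family = {}; ... model_to_family[model_id] = family
def pvBuild (config : List (String × List (String × List (List (String × String))))) : PySem.Dict String String :=
  ["multimodal_models", "text_only_models"].foldl (fun d cat =>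
    match (PySem.Dict.mk config).get? cat with
    | none => d
    | some fams => fams.foldl (fun d fp => fp.2.foldl (fun d entry =>
        match (PySem.Dict.mk entry).get? "model_id" with
        | none => d
        | some mid => if mid = "" then d else d.insert mid fp.1) d) d)
    PySem.Dict.empty

def add_family_info (models : List (List (String × String))) (config : List (String × List (String × List (List (String × String))))) : List (List (String × String)) :=
  let model_to_family := pvBuild config
  models.map (fun model =>
    match (PySem.Dict.mk model).get? "model_id" with
    | none => model
    | some mid =>
      match model_to_family.get? mid with
      | none => model
      | some fam => insFam fam model)

-- ===== PORT B =====
-- B's grouping loop: models_by_id.setdefault(model_id, []).append(model)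
-- (models are referenced by their position in the list)
def pvIndexB (models : List (List (String × String))) : PySem.Dict String (List Nat) :=
  models.zipIdx.foldl (fun d p =>
    match (PySem.Dict.mk p.1).get? "model_id" with
    | none => d
    | some mid => if mid = "" then d else d.modify mid [] (· ++ [p.2])) PySem.Dict.empty

def add_family_info_alt (models : List (List (String × String))) (config : List (String × List (String × List (List (String × String))))) : List (List (String × String)) :=
  let models_by_id := pvIndexB models
  ["multimodal_models", "text_only_models"].foldl (fun st cat =>
    match (PySem.Dict.mk config).get? cat with
    | none => st
    | some fams => fams.foldl (fun st fp => fp.2.foldl (fun st entry =>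
        match (PySem.Dict.mk entry).get? "model_id" with
        | none => st
        | some mid => if mid = "" then st else
            (models_by_id.getD mid []).foldl
              (fun st j => st.set j (insFam fp.1 (st.getD j []))) st) st) st)
    models

-- ===== PRECONDITION & SPEC =====
def Spec_add_family_info (models : List (List (String × String))) (config : List (String × List (String × List (List (String × String))))) (out : List (List (String × String))) : Prop := out = add_family_info_alt models config
instance (models : List (List (String × String))) (config : List (String × List (String × List (List (String × String))))) (out : List (List (String × String))) : Decidable (Spec_add_family_info models config out) := by unfold Spec_add_family_info; infer_instance

-- ===== CLAIM (what is proved, stated in full; the proofs are below) =====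
def Claim_equal_add_family_info : Prop := ∀ (models : List (List (String × String))) (config : List (String × List (String × List (List (String × String))))), Dom_add_family_info models config → Spec_add_family_info models config (add_family_info models config)

-- ===== LEMMAS AND PROOFS =====

-- the model's truthy id, if any
def pvIdOf (m : List (String × String)) : Option String :=
  match (PySem.Dict.mk m).get? "model_id" with
  | none => none
  | some mid => if mid = "" then none else some mid

-- the config flattened to its truthy (model_id, family) pairs, in scan order
def pvFlatB (config : List (String × List (String × List (List (String × String))))) : List (String × String) :=
  ["multimodal_models", "text_only_models"].flatMap (fun cat =>
    match (PySem.Dict.mk config).get? cat with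
    | none => []
    | some fams => fams.flatMap (fun fp =>
        fp.2.filterMap (fun entry => (pvIdOf entry).map (fun mid => (mid, fp.1)))))

-- families a pair list assigns to a given id, in order
def pvFams (Q : List (String × String)) (mid : String) : List String :=
  (Q.filter (fun p => p.1 == mid)).map (·.2)

def pvApply (m : List (String × String)) (fams : List String) : List (String × String) :=
  fams.foldl (fun acc f => insFam f acc) m

-- the canonical per-model result after processing the pair list Q
def pvG (Q : List (String × String)) (m : List (String × String)) : List (String × String) :=
  match pvIdOf m with
  | none => m
  | some mid => pvApply m (pvFams Q mid)

-- both ports' nested config loops are a fold over the flattened pair list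
theorem nest_flat {α : Type} (config : List (String × List (String × List (List (String × String)))))
    (step : α → String × String → α) (init : α) :
    (["multimodal_models", "text_only_models"].foldl (fun s cat =>
      match (PySem.Dict.mk config).get? cat with
      | none => s
      | some fams => fams.foldl (fun s fp => fp.2.foldl (fun s entry =>
          match (PySem.Dict.mk entry).get? "model_id" with
          | none => s
          | some mid => if mid = "" then s else step s (mid, fp.1)) s) s) init)
    = (pvFlatB config).foldl step init := by
  have hstep : ∀ (fam : String) (e : List (String × String)) (s : α),
      (match (PySem.Dict.mk e).get? "model_id" with
       | none => s
       | some mid => if mid = "" then s else step s (mid, fam))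
      = (match pvIdOf e with | none => s | some mid => step s (mid, fam)) := by
    intro fam e s
    unfold pvIdOf
    cases (PySem.Dict.mk e).get? "model_id" with
    | none => rfl
    | some mid => by_cases hm : mid = "" <;> simp [hm]
  have hent' : ∀ (fam : String) (entries : List (List (String × String))) (s : α),
      entries.foldl (fun s entry =>
          match pvIdOf entry with
          | none => s
          | some mid => step s (mid, fam)) s
      = (entries.filterMap (fun entry => (pvIdOf entry).map (fun mid => (mid, fam)))).foldl step s := by
    intro fam entries
    induction entries with
    | nil => intro s; rfl
    | cons e rest ih =>
      intro s
      simp only [List.foldl_cons, List.filterMap_cons]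
      cases pvIdOf e <;> simp [ih]
  have hent : ∀ (fam : String) (entries : List (List (String × String))) (s : α),
      entries.foldl (fun s entry =>
          match (PySem.Dict.mk entry).get? "model_id" with
          | none => s
          | some mid => if mid = "" then s else step s (mid, fam)) s
      = (entries.filterMap (fun entry => (pvIdOf entry).map (fun mid => (mid, fam)))).foldl step s := by
    intro fam entries s
    simp only [hstep]
    exact hent' fam entries s
  have hfam : ∀ (fams : List (String × List (List (String × String)))) (s : α),
      fams.foldl (fun s fp => fp.2.foldl (fun s entry =>
          match (PySem.Dict.mk entry).get? "model_id" with
          | none => s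
          | some mid => if mid = "" then s else step s (mid, fp.1)) s) s
      = (fams.flatMap (fun fp =>
          fp.2.filterMap (fun entry => (pvIdOf entry).map (fun mid => (mid, fp.1))))).foldl step s := by
    intro fams s
    have hfun : (fun (s : α) (fp : String × List (List (String × String))) =>
        fp.2.foldl (fun s entry =>
          match (PySem.Dict.mk entry).get? "model_id" with
          | none => s
          | some mid => if mid = "" then s else step s (mid, fp.1)) s)
        = (fun s fp => (fp.2.filterMap (fun entry => (pvIdOf entry).map (fun mid => (mid, fp.1)))).foldl step s) := by
      funext s fp
      exact hent fp.1 fp.2 s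
    rw [hfun, List.foldl_flatMap]
  simp only [List.foldl_cons, List.foldl_nil, pvFlatB, List.flatMap_cons, List.flatMap_nil,
    List.append_nil, List.foldl_append]
  cases h1 : (PySem.Dict.mk config).get? "multimodal_models" <;>
    cases h2 : (PySem.Dict.mk config).get? "text_only_models" <;>
      simp [hfam]

-- assigning "family" twice keeps only the last assignment
theorem insFam_insFam (f f' : String) (m : List (String × String)) :
    insFam f (insFam f' m) = insFam f m := by
  show (((PySem.Dict.mk m).insert "family" f').insert "family" f).items = _
  rw [PySem.Dict.insert_insert_self]
  rfl

theorem pvApply_collapse (m : List (String × String)) (fams : List String) :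
    pvApply m fams = match fams.getLast? with | none => m | some f => insFam f m := by
  induction fams using List.reverseRecOn with
  | nil => rfl
  | append_singleton l f ih =>
    unfold pvApply at *
    rw [List.foldl_append, ih]
    cases h : l.getLast? <;> simp [List.getLast?_append, insFam_insFam]

-- A's dict build looks up to the LAST matching pair
theorem foldl_insert_get? (P : List (String × String)) (d : PySem.Dict String String) (mid : String) :
    (P.foldl (fun d p => d.insert p.1 p.2) d).get? mid
    = (pvFams P mid).getLast?.or (d.get? mid) := by
  induction P generalizing d with
  | nil => simp [pvFams]
  | cons p rest ih =>
    simp only [List.foldl_cons, ih, pvFams, List.filter_cons]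
    by_cases hp : p.1 = mid
    · simp only [hp, beq_self_eq_true, if_true, List.map_cons]
      cases h : ((rest.filter (fun q => q.1 == mid)).map (·.2)).getLast? with
      | none =>
        have : (rest.filter (fun q => q.1 == mid)).map (·.2) = [] := List.getLast?_eq_none_iff.mp h
        simp [List.getLast?_cons, this, PySem.Dict.get?_insert_self]
      | some f => simp [List.getLast?_cons, h]
    · have : (p.1 == mid) = false := by simp [hp]
      simp [this, PySem.Dict.get?_insert_of_ne _ _ (fun hh => hp hh.symm)]

-- pairs in the flattened config list never carry the empty id
theorem flat_ne_empty (config : List (String × List (String × List (List (String × String)))))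
    (p : String × String) (hp : p ∈ pvFlatB config) : p.1 ≠ "" := by
  unfold pvFlatB at hp
  simp only [List.mem_flatMap] at hp
  obtain ⟨cat, -, hcat⟩ := hp
  rcases h : (PySem.Dict.mk config).get? cat with _ | fams <;> rw [h] at hcat
  · simp at hcat
  · simp only [List.mem_flatMap, List.mem_filterMap, Option.map_eq_some_iff] at hcat
    obtain ⟨fp, -, e, -, mid, hid, hpe⟩ := hcat
    unfold pvIdOf at hid
    rcases hg : (PySem.Dict.mk e).get? "model_id" with _ | m <;> rw [hg] at hid
    · simp at hid
    · by_cases hm : m = "" <;> simp [hm] at hid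
      subst hid hpe
      simpa using hm

theorem A_canon (models : List (List (String × String)))
    (config : List (String × List (String × List (List (String × String))))) :
    add_family_info models config = models.map (pvG (pvFlatB config)) := by
  have hb : pvBuild config = (pvFlatB config).foldl (fun d p => d.insert p.1 p.2) PySem.Dict.empty := by
    unfold pvBuild
    exact nest_flat config (fun d p => d.insert p.1 p.2) PySem.Dict.empty
  show models.map _ = _
  apply List.map_congr_left
  intro m _
  rw [hb]
  cases hg : (PySem.Dict.mk m).get? "model_id" with
  | none => simp [pvG, pvIdOf, hg]
  | some mid =>
    by_cases hm : mid = ""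
    · subst hm
      have hnil : pvFams (pvFlatB config) "" = [] := by
        unfold pvFams
        rw [List.filter_eq_nil_iff.mpr]
        · rfl
        · intro p hp
          simpa using flat_ne_empty config p hp
      dsimp only
      rw [foldl_insert_get?]
      simp [pvG, pvIdOf, hg, hnil, PySem.Dict.get?_empty]
    · dsimp only
      rw [foldl_insert_get?]
      simp only [pvG, pvIdOf, hg, hm, if_false, pvApply_collapse, PySem.Dict.get?_empty]
      cases (pvFams (pvFlatB config) mid).getLast? <;> simp [Option.or]

-- ### B side ###

-- B's guarded grouping loop is a modify-fold over the keyed (id, index) pairs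
theorem index_conv (l : List ((List (String × String)) × Nat)) (d : PySem.Dict String (List Nat)) :
    l.foldl (fun d p =>
      match (PySem.Dict.mk p.1).get? "model_id" with
      | none => d
      | some mid => if mid = "" then d else d.modify mid [] (· ++ [p.2])) d
    = (l.filterMap (fun p => (pvIdOf p.1).map (fun mid => (mid, p.2)))).foldl
        (fun d q => d.modify q.1 [] (· ++ [q.2])) d := by
  have hstep : ∀ (p : (List (String × String)) × Nat) (d : PySem.Dict String (List Nat)),
      (match (PySem.Dict.mk p.1).get? "model_id" with
       | none => d
       | some mid => if mid = "" then d else d.modify mid [] (· ++ [p.2]))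
      = (match pvIdOf p.1 with | none => d | some mid => d.modify mid [] (· ++ [p.2])) := by
    intro p d
    unfold pvIdOf
    cases (PySem.Dict.mk p.1).get? "model_id" with
    | none => rfl
    | some mid => by_cases hm : mid = "" <;> simp [hm]
  have conv' : ∀ (l : List ((List (String × String)) × Nat)) (d : PySem.Dict String (List Nat)),
      l.foldl (fun d p =>
        match pvIdOf p.1 with
        | none => d
        | some mid => d.modify mid [] (· ++ [p.2])) d
      = (l.filterMap (fun p => (pvIdOf p.1).map (fun mid => (mid, p.2)))).foldl
          (fun d q => d.modify q.1 [] (· ++ [q.2])) d := by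
    intro l
    induction l with
    | nil => intro d; rfl
    | cons p rest ih =>
      intro d
      simp only [List.foldl_cons, List.filterMap_cons]
      cases pvIdOf p.1 <;> simp [ih]
  simp only [hstep]
  exact conv' l d

theorem mem_index (models : List (List (String × String))) (mid : String) (j : Nat) :
    j ∈ (pvIndexB models).getD mid [] ↔ ∃ m, models[j]? = some m ∧ pvIdOf m = some mid := by
  unfold pvIndexB
  rw [index_conv, PySem.Dict.getD_foldl_modify_append, PySem.Dict.getD_empty]
  constructor
  · intro h
    simp only [List.nil_append, List.mem_map] at h
    obtain ⟨q, hq, hq2⟩ := h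
    rw [List.mem_filter] at hq
    obtain ⟨hq1, hkey⟩ := hq
    rw [List.mem_filterMap] at hq1
    obtain ⟨p, hp, hmap⟩ := hq1
    rw [Option.map_eq_some_iff] at hmap
    obtain ⟨mid2, hid2, hpair⟩ := hmap
    subst hpair
    simp only at hkey hq2
    have hmid : mid2 = mid := by simpa using hkey
    subst hmid
    subst hq2
    have hg := List.mem_zipIdx_iff_getElem?.mp hp
    exact ⟨p.1, by simpa using hg, hid2⟩
  · rintro ⟨m, hget, hid⟩
    simp only [List.nil_append, List.mem_map]
    refine ⟨(mid, j), ?_, rfl⟩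
    rw [List.mem_filter]
    refine ⟨?_, by simp⟩
    rw [List.mem_filterMap]
    exact ⟨(m, j), List.mem_zipIdx_iff_getElem?.mpr (by simpa using hget), by rw [hid]; rfl⟩

-- the per-pair assignment loop, element-wise
theorem foldl_set_getElem? (fam : String) (L : List Nat) (st : List (List (String × String))) (j : Nat) :
    (L.foldl (fun st i => st.set i (insFam fam (st.getD i []))) st)[j]?
    = if j ∈ L then (st[j]?).map (insFam fam) else st[j]? := by
  induction L generalizing st with
  | nil => simp
  | cons i rest ih =>
    simp only [List.foldl_cons, ih, List.mem_cons]
    have hset : ∀ (k : Nat), (st.set i (insFam fam (st.getD i [])))[k]?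
        = if i = k ∧ i < st.length then some (insFam fam (st.getD i [])) else st[k]? := by
      intro k
      rw [List.getElem?_set]
      split_ifs with h1 h2 h3 <;> simp_all
      omega
    by_cases hij : i = j
    · subst hij
      by_cases hlen : i < st.length
      · have hgd : st.getD i [] = st[i] := by
          rw [List.getD_eq_getElem?_getD]
          simp [List.getElem?_eq_getElem hlen]
        rw [hgd]
        have h1 : (st.set i (insFam fam st[i]))[i]? = some (insFam fam st[i]) := by
          rw [List.getElem?_set]
          simp [hlen]
        by_cases hjr : i ∈ rest <;>
          simp [hjr, h1, List.getElem?_eq_getElem hlen, insFam_insFam]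
      · have h0 : st[i]? = none := List.getElem?_eq_none (by omega)
        by_cases hjr : i ∈ rest <;> simp [hjr, h0] <;> omega
    · have h1 : (st.set i (insFam fam (st.getD i [])))[j]? = st[j]? := by
        rw [hset j]
        simp [hij]
      by_cases hjr : j ∈ rest
      · rw [if_pos hjr, h1]
        simp [hjr]
      · rw [if_neg hjr, h1]
        simp only [hjr, or_false]
        rw [if_neg (fun h : j = i => hij h.symm)]

theorem pvFams_append (Q : List (String × String)) (p : String × String) (mid : String) :
    pvFams (Q ++ [p]) mid = pvFams Q mid ++ (if p.1 = mid then [p.2] else []) := by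
  unfold pvFams
  rw [List.filter_append, List.map_append]
  by_cases h : p.1 = mid <;> simp [h]

theorem assign_step (models : List (List (String × String))) (Q : List (String × String))
    (mid fam : String) :
    ((pvIndexB models).getD mid []).foldl
      (fun st j => st.set j (insFam fam (st.getD j []))) (models.map (pvG Q))
    = models.map (pvG (Q ++ [(mid, fam)])) := by
  apply List.ext_getElem?
  intro j
  rw [foldl_set_getElem?]
  by_cases hlen : j < models.length
  · have hA : (models.map (pvG Q))[j]? = some (pvG Q models[j]) := by
      simp [hlen]
    have hB : (models.map (pvG (Q ++ [(mid, fam)])))[j]? = some (pvG (Q ++ [(mid, fam)]) models[j]) := by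
      simp [hlen]
    by_cases hmem : j ∈ (pvIndexB models).getD mid []
    · obtain ⟨m, hget, hid⟩ := (mem_index models mid j).mp hmem
      have hm : m = models[j] := by
        rw [List.getElem?_eq_getElem hlen] at hget
        exact (Option.some_inj.mp hget).symm
      subst hm
      rw [if_pos hmem, hA, hB]
      simp only [Option.map_some]
      congr 1
      have happ : pvApply models[j] (pvFams Q mid ++ [fam]) = insFam fam (pvApply models[j] (pvFams Q mid)) := by
        unfold pvApply
        rw [List.foldl_append]
        rfl
      simp [pvG, hid, pvFams_append, happ]
    · rw [if_neg hmem, hA, hB]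
      congr 1
      cases hid : pvIdOf models[j] with
      | none => simp [pvG, hid]
      | some mid' =>
        have hne : mid ≠ mid' := by
          intro h
          exact hmem ((mem_index models mid j).mpr ⟨models[j], List.getElem?_eq_getElem hlen, by rw [hid, h]⟩)
        simp [pvG, hid, pvFams_append, hne]
  · have h1 : (models.map (pvG Q))[j]? = none := by
      simp; omega
    have h2 : (models.map (pvG (Q ++ [(mid, fam)])))[j]? = none := by
      simp; omega
    rw [h1, h2]
    simp

theorem fold_assign (models : List (List (String × String))) (P Q : List (String × String))
    (st : List (List (String × String))) (hst : st = models.map (pvG Q)) :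
    P.foldl (fun st p => ((pvIndexB models).getD p.1 []).foldl
        (fun st j => st.set j (insFam p.2 (st.getD j []))) st) st
    = models.map (pvG (Q ++ P)) := by
  induction P generalizing Q st with
  | nil => simp [hst]
  | cons p rest ih =>
    subst hst
    simp only [List.foldl_cons]
    have h1 : ((pvIndexB models).getD p.1 []).foldl
        (fun st j => st.set j (insFam p.2 (st.getD j []))) (models.map (pvG Q))
        = models.map (pvG (Q ++ [p])) := by
      simpa using assign_step models Q p.1 p.2
    rw [h1, ih (Q ++ [p]) _ rfl]
    simp

theorem pvG_nil (m : List (String × String)) : pvG [] m = m := by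
  unfold pvG pvFams pvApply
  cases pvIdOf m <;> rfl

theorem B_canon (models : List (List (String × String)))
    (config : List (String × List (String × List (List (String × String))))) :
    add_family_info_alt models config = models.map (pvG (pvFlatB config)) := by
  show (["multimodal_models", "text_only_models"].foldl (fun st cat =>
    match (PySem.Dict.mk config).get? cat with
    | none => st
    | some fams => fams.foldl (fun st fp => fp.2.foldl (fun st entry =>
        match (PySem.Dict.mk entry).get? "model_id" with
        | none => st
        | some mid => if mid = "" then st else
            ((pvIndexB models).getD mid []).foldl
              (fun st j => st.set j (insFam fp.1 (st.getD j []))) st) st) st)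
    models) = _
  rw [nest_flat config (fun st p => ((pvIndexB models).getD p.1 []).foldl
        (fun st j => st.set j (insFam p.2 (st.getD j []))) st) models]
  have hfun : pvG [] = id := funext pvG_nil
  have h0 : models = models.map (pvG []) := by
    simp [hfun]
  rw [fold_assign models (pvFlatB config) [] models h0]
  simp

-- ===== VERDICT (by name: the statement is the Claim_ definition above) =====
theorem add_family_info_spec : Claim_equal_add_family_info := by
  intro models config _
  unfold Spec_add_family_info
  rw [A_canon, B_canon]
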